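-- pv_equiv track=rewrite | github.com/DNA-origamicon/NADOC | backend/core/pdb_to_design.py | _segment_duplexes
-- ===== SOURCE A (Python) =====
-- def _segment_duplexes(
--     pairs: list[tuple[tuple[str, int], tuple[str, int]]],
-- ) -> list[list[tuple[tuple[str, int], tuple[str, int]]]]:
--     """Group WC pairs into consecutive duplex segments on chain A."""
--     if not pairs:
--         return []
--     pairs = sorted(pairs, key=lambda p: (p[0][0], p[0][1]))
--     duplexes: list[list[tuple[tuple[str, int], tuple[str, int]]]] = []
--     current = [pairs[0]]
--     for pair in pairs[1:]:
--         prev = current[-1]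
--         same_chains = pair[0][0] == prev[0][0] and pair[1][0] == prev[1][0]
--         consecutive = pair[0][1] == prev[0][1] + 1
--         if same_chains and consecutive:
--             current.append(pair)
--         else:
--             duplexes.append(current)
--             current = [pair]
--     duplexes.append(current)
--     return duplexes
-- ===== SOURCE B (Python) =====
-- def _segment_duplexes(pairs):
--     """Group WC pairs into consecutive duplex segments on chain A.
--
--     Staged decomposition: (1) sort; (2) compute the CUT INDICES where a new
--     segment must start (chain change or non-consecutive residue); (3) slice
--     the sorted list at those cuts.  No group accumulator is maintained.
--     """
--     sp = sorted(pairs, key=lambda p: (p[0][0], p[0][1]))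
--     if not sp:
--         return []
--     n = len(sp)
--     cuts = [0] + [i for i in range(1, n) if not _adjacent(sp[i - 1], sp[i])] + [n]
--     return [sp[a:b] for a, b in zip(cuts, cuts[1:])]
--
--
-- def _adjacent(p, q):
--     return p[0][0] == q[0][0] and p[1][0] == q[1][0] and q[0][1] == p[0][1] + 1
-- ===== Notes on version B (the rewrite author's own statement) =====
-- stated objective: alternative
-- what changed: Replaces A's single-pass grow-and-flush accumulator with a staged pipeline: after the same sort, one pass over indices collects the boundary cut positions, and a second pass slices the sorted list at those cuts; no current-segment state is kept.
import Mathlib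
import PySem

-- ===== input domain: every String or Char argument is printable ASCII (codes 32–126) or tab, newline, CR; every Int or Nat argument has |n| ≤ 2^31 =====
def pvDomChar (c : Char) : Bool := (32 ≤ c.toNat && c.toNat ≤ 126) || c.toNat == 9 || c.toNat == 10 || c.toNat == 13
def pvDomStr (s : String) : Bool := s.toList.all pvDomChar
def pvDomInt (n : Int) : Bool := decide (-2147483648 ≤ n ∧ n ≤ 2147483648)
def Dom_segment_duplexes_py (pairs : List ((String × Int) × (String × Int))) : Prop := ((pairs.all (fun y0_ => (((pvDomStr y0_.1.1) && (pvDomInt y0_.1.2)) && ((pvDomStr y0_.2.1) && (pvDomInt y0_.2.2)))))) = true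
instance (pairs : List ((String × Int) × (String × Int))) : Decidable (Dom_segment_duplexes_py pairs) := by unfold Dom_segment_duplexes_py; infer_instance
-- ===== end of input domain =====

-- One honest line: B replaces A's grow-and-flush accumulator by a staged pipeline — sort,
-- collect the boundary cut indices, then slice the sorted list at those cuts (objective: alternative).

-- ===== PORT A =====
def segA_step (st : List (List ((String × Int) × (String × Int))) × List ((String × Int) × (String × Int)))
    (p : (String × Int) × (String × Int)) :
    List (List ((String × Int) × (String × Int))) × List ((String × Int) × (String × Int)) :=
  match st.2.getLast? with
  | some prev =>
      if p.1.1 == prev.1.1 && p.2.1 == prev.2.1 && p.1.2 == prev.1.2 + 1 then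
        (st.1, st.2 ++ [p])
      else (st.1 ++ [st.2], [p])
  | none => (st.1 ++ [st.2], [p])   -- unreachable: current is never empty

def segment_duplexes_py (pairs : List ((String × Int) × (String × Int))) : List (List ((String × Int) × (String × Int))) :=
  if pairs = [] then []
  else
    match PySem.List.sorted2 pairs (fun p => p.1.1) (fun p => p.1.2) with
    | [] => []   -- unreachable: sorted of a nonempty list is nonempty
    | x :: rest =>
        let st := rest.foldl segA_step ([], [x])
        st.1 ++ [st.2]

-- ===== PORT B =====
-- _adjacent(p, q) from Source B
def segB_adj (p q : (String × Int) × (String × Int)) : Bool :=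
  p.1.1 == q.1.1 && p.2.1 == q.2.1 && q.1.2 == p.1.2 + 1

-- the comprehension's test at index i: 'not _adjacent(sp[i-1], sp[i])' (sp[.] via pyGet?;
-- the none branches are unreachable for i in range(1, len sp))
def segB_break (sp : List ((String × Int) × (String × Int))) (i : Int) : Bool :=
  match PySem.List.pyGet? sp (i - 1), PySem.List.pyGet? sp i with
  | some p, some q => !segB_adj p q
  | _, _ => false

def segment_duplexes_py_alt (pairs : List ((String × Int) × (String × Int))) : List (List ((String × Int) × (String × Int))) :=
  let sp := PySem.List.sorted2 pairs (fun p => p.1.1) (fun p => p.1.2)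
  if sp = [] then []
  else
    let n : Int := sp.length
    let cuts : List Int := 0 :: ((PySem.List.pyRange 1 n 1).filter (segB_break sp) ++ [n])
    (cuts.zip (PySem.List.slice cuts (some 1) none)).map
      (fun ab => PySem.List.slice sp (some ab.1) (some ab.2))

-- ===== PRECONDITION & SPEC =====
def Spec_segment_duplexes_py (pairs : List ((String × Int) × (String × Int))) (out : List (List ((String × Int) × (String × Int)))) : Prop := out = segment_duplexes_py_alt pairs
instance (pairs : List ((String × Int) × (String × Int))) (out : List (List ((String × Int) × (String × Int)))) : Decidable (Spec_segment_duplexes_py pairs out) := by unfold Spec_segment_duplexes_py; infer_instance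

-- ===== CLAIM (what is proved, stated in full; the proofs are below) =====
def Claim_equal_segment_duplexes_py : Prop := ∀ (pairs : List ((String × Int) × (String × Int))), Dom_segment_duplexes_py pairs → Spec_segment_duplexes_py pairs (segment_duplexes_py pairs)

-- ===== LEMMAS AND PROOFS =====

-- common proof-side view of the grouping: a foldr that conses the next pair onto
-- the front group when adjacent, else opens a new front group
def segB_step (groups : List (List ((String × Int) × (String × Int))))
    (p : (String × Int) × (String × Int)) : List (List ((String × Int) × (String × Int))) :=
  match groups with
  | (y :: g) :: gs =>
      if segB_adj p y then (p :: y :: g) :: gs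
      else [p] :: (y :: g) :: gs
  | _ => [p] :: groups

def segAlt (l : List ((String × Int) × (String × Int))) : List (List ((String × Int) × (String × Int))) :=
  l.foldr (fun p gs => segB_step gs p) []

theorem segB_step_shape (gs : List (List ((String × Int) × (String × Int))))
    (p : (String × Int) × (String × Int)) :
    ∃ r gs', segB_step gs p = (p :: r) :: gs' := by
  match gs with
  | [] => exact ⟨[], [], rfl⟩
  | [] :: t => exact ⟨[], [] :: t, rfl⟩
  | (y :: g) :: t =>
      by_cases hb : segB_adj p y = true
      · exact ⟨y :: g, t, by simp [segB_step, hb]⟩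
      · exact ⟨[], (y :: g) :: t, by simp [segB_step, hb]⟩

-- ---- A-side: the grow-and-flush fold computes segAlt ----

def segG (cur : List ((String × Int) × (String × Int))) (l : List ((String × Int) × (String × Int))) :
    List (List ((String × Int) × (String × Int))) :=
  match l with
  | [] => [cur]
  | p :: rest =>
      match cur.getLast? with
      | some prev =>
          if p.1.1 == prev.1.1 && p.2.1 == prev.2.1 && p.1.2 == prev.1.2 + 1 then
            segG (cur ++ [p]) rest
          else cur :: segG [p] rest
      | none => cur :: segG [p] rest

theorem segA_loop (l : List ((String × Int) × (String × Int))) :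
    ∀ ds cur, ((l.foldl segA_step (ds, cur)).1 ++ [(l.foldl segA_step (ds, cur)).2]) = ds ++ segG cur l := by
  induction l with
  | nil => intro ds cur; simp [segG]
  | cons p rest ih =>
    intro ds cur
    cases hl : cur.getLast? with
    | none =>
        simp only [List.foldl_cons, segA_step, hl, segG]
        rw [ih]; simp
    | some prev =>
        by_cases hb : (p.1.1 == prev.1.1 && p.2.1 == prev.2.1 && p.1.2 == prev.1.2 + 1) = true
        · simp only [List.foldl_cons, segA_step, hl, hb, if_pos, segG]
          rw [ih]
        · simp only [List.foldl_cons, segA_step, hl, hb, if_neg, segG, Bool.false_eq_true,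
            not_false_eq_true]
          rw [ih]; simp

theorem segB_adj_comm (p prev : (String × Int) × (String × Int)) :
    segB_adj prev p = (p.1.1 == prev.1.1 && p.2.1 == prev.2.1 && p.1.2 == prev.1.2 + 1) := by
  unfold segB_adj
  rw [Bool.eq_iff_iff]
  simp only [Bool.and_eq_true, beq_iff_eq]
  constructor <;> rintro ⟨⟨h1, h2⟩, h3⟩ <;> exact ⟨⟨h1.symm, h2.symm⟩, h3⟩

theorem segG_eq_alt : ∀ (l cur : List ((String × Int) × (String × Int))) (prev : (String × Int) × (String × Int)),
    cur.getLast? = some prev →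
    ∀ r gs, segAlt (prev :: l) = (prev :: r) :: gs → segG cur l = (cur ++ r) :: gs := by
  intro l
  induction l with
  | nil =>
      intro cur prev _ r gs h
      have h' : ([prev] : List ((String × Int) × (String × Int))) :: [] = (prev :: r) :: gs := h
      injection h' with h1 h2
      injection h1 with _ h3
      subst h3; subst h2; simp [segG]
  | cons p rest ih =>
      intro cur prev hlast r gs h
      obtain ⟨r2, gs2, hsh⟩ := segB_step_shape (segAlt rest) p
      have hps : segAlt (p :: rest) = (p :: r2) :: gs2 := hsh
      have h2 : segAlt (prev :: p :: rest) = segB_step ((p :: r2) :: gs2) prev := by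
        show segB_step (segAlt (p :: rest)) prev = _
        rw [hps]
      by_cases hb : (p.1.1 == prev.1.1 && p.2.1 == prev.2.1 && p.1.2 == prev.1.2 + 1) = true
      · have hA : segAlt (prev :: p :: rest) = (prev :: p :: r2) :: gs2 := by
          rw [h2]; simp [segB_step, segB_adj_comm, hb]
        rw [hA] at h
        injection h with h1 hgs
        injection h1 with _ hr
        subst hr; subst hgs
        have hlast' : (cur ++ [p]).getLast? = some p := by simp
        have hrec := ih (cur ++ [p]) p hlast' r2 gs2 hps
        simp only [segG, hlast, hb, if_pos]
        rw [hrec]; simp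
      · have hA : segAlt (prev :: p :: rest) = [prev] :: (p :: r2) :: gs2 := by
          rw [h2]; simp [segB_step, segB_adj_comm, hb]
        rw [hA] at h
        injection h with h1 hgs
        injection h1 with _ hr
        subst hr; subst hgs
        have hrec := ih [p] p (by simp) r2 gs2 hps
        simp only [segG, hlast, hb, Bool.false_eq_true, if_false]
        rw [hrec]; simp

-- ---- B-side: cuts-and-slices computes segAlt ----

-- gap g is a break when sp[g], sp[g+1] are not adjacent
def gaps : List ((String × Int) × (String × Int)) → List Nat
  | [] => []
  | [_] => []
  | x :: y :: t => (if segB_adj x y then [] else [0]) ++ (gaps (y :: t)).map (· + 1)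

def natCuts (l : List ((String × Int) × (String × Int))) : List Nat :=
  0 :: ((gaps l).map (· + 1) ++ [l.length])

def chunksOf (l : List ((String × Int) × (String × Int))) (c : List Nat) :
    List (List ((String × Int) × (String × Int))) :=
  (c.zip c.tail).map (fun ab => (l.drop ab.1).take (ab.2 - ab.1))

theorem zip_tail_map (h : Nat) (t : List Nat) :
    (((h + 1) :: t.map (· + 1)).zip (t.map (· + 1))) = ((h :: t).zip t).map (fun ab => (ab.1 + 1, ab.2 + 1)) := by
  induction t generalizing h with
  | nil => simp
  | cons b t2 ih =>
      simp only [List.map_cons, List.zip_cons_cons]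
      rw [ih b]

theorem chunksOf_shift (x : (String × Int) × (String × Int))
    (l : List ((String × Int) × (String × Int))) (h : Nat) (t : List Nat) :
    chunksOf (x :: l) (0 :: (h :: t).map (· + 1)) = ((x :: l).take (h + 1)) :: chunksOf l (h :: t) := by
  simp only [chunksOf, List.map_cons, List.tail_cons, List.zip_cons_cons, List.drop_zero,
    Nat.sub_zero]
  congr 1
  rw [zip_tail_map, List.map_map]
  apply List.map_congr_left
  intro ab _
  simp [Nat.add_sub_add_right]

theorem chunksOf_zero_cons (l : List ((String × Int) × (String × Int))) (h : Nat) (t : List Nat) :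
    chunksOf l (0 :: h :: t) = (l.take h) :: chunksOf l (h :: t) := by
  simp [chunksOf]

theorem chunksOf_natCuts : ∀ (l : List ((String × Int) × (String × Int))), l ≠ [] →
    chunksOf l (natCuts l) = segAlt l := by
  intro l
  induction l with
  | nil => intro h; exact absurd rfl h
  | cons x l' ih =>
    intro _
    cases l' with
    | nil =>
        simp [natCuts, gaps, chunksOf, segAlt, segB_step]
    | cons y t =>
        obtain ⟨r, gs, hsh⟩ := segB_step_shape (segAlt t) y
        have hyt : segAlt (y :: t) = (y :: r) :: gs := hsh
        have hIH := ih (by simp)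
        set T : List Nat := (gaps (y :: t)).map (· + 1) ++ [(y :: t).length] with hT
        obtain ⟨h0, t0, hTc⟩ : ∃ h0 t0, T = h0 :: t0 := by
          cases hTe : T with
          | nil => exact absurd hTe (by simp [hT])
          | cons a b => exact ⟨a, b, rfl⟩
        have hcuts' : natCuts (y :: t) = 0 :: h0 :: t0 := by rw [natCuts, ← hT, hTc]
        have hsegAlt : segAlt (x :: y :: t) = segB_step ((y :: r) :: gs) x := by
          show segB_step (segAlt (y :: t)) x = _
          rw [hyt]
        rw [hcuts', chunksOf_zero_cons, hyt] at hIH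
        have hhead : (y :: t).take h0 = y :: r := ((List.cons.injEq _ _ _ _).mp hIH).1
        have htail : chunksOf (y :: t) (h0 :: t0) = gs := ((List.cons.injEq _ _ _ _).mp hIH).2
        by_cases hb : segB_adj x y = true
        · -- no break at gap 0
          have hcuts : natCuts (x :: y :: t) = 0 :: T.map (· + 1) := by
            simp [natCuts, gaps, hb, hT, List.map_map]
          rw [hcuts, hTc, chunksOf_shift, htail, hsegAlt]
          have : (x :: y :: t).take (h0 + 1) = x :: (y :: t).take h0 := rfl
          rw [this, hhead]
          simp [segB_step, hb]
        · -- break at gap 0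
          have hcuts : natCuts (x :: y :: t) = 0 :: (natCuts (y :: t)).map (· + 1) := by
            simp [natCuts, gaps, hb, List.map_map]
          rw [hcuts, hcuts', chunksOf_shift, ← hcuts',
            show ((0 : Nat) + 1) = 1 from rfl]
          have h1 : chunksOf (y :: t) (natCuts (y :: t)) = (y :: r) :: gs := by
            rw [hcuts', chunksOf_zero_cons, htail, hhead]
          rw [h1, hsegAlt]
          simp [segB_step, hb]

-- bridge: the port's Int cut list is the Nat cut list, cast
theorem break_eq (x y : (String × Int) × (String × Int)) (t : List ((String × Int) × (String × Int))) :
    segB_break (x :: y :: t) 1 = !segB_adj x y := by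
  simp [segB_break, PySem.List.pyGet?_zero_cons]

theorem break_shift (x : (String × Int) × (String × Int))
    (l : List ((String × Int) × (String × Int))) (k : Nat) :
    segB_break (x :: l) (1 + ((k : Int) + 1)) = segB_break l (1 + (k : Int)) := by
  have h2 : (1 + ((k : Int) + 1)) = ((k + 2 : Nat) : Int) := by push_cast; ring
  have h4 : (1 + (k : Int)) = ((k + 1 : Nat) : Int) := by push_cast; ring
  have h5 : ((k + 2 : Nat) : Int) - 1 = ((k + 1 : Nat) : Int) := by push_cast; ring
  simp only [segB_break, h2, h4, h5, PySem.List.pyGet?_natCast]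
  simp

theorem filter_break_eq_gaps : ∀ (l : List ((String × Int) × (String × Int))),
    (List.range (l.length - 1)).filter (fun (k : Nat) => segB_break l (1 + (k : Int))) = gaps l := by
  intro l
  induction l with
  | nil => simp [gaps]
  | cons x l' ih =>
    cases l' with
    | nil => simp [gaps]
    | cons y t =>
        have hlen : (x :: y :: t).length - 1 = t.length + 1 := by simp
        rw [hlen, List.range_succ_eq_map, List.filter_cons, List.filter_map]
        have hcomp : ∀ k ∈ List.range t.length,
            ((fun (k : Nat) => segB_break (x :: y :: t) (1 + (k : Int))) ∘ Nat.succ) k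
              = (fun (k : Nat) => segB_break (y :: t) (1 + (k : Int))) k := by
          intro k _
          show segB_break (x :: y :: t) (1 + ((k + 1 : Nat) : Int)) = _
          exact_mod_cast break_shift x (y :: t) k
        rw [List.filter_congr hcomp]
        have h0 : segB_break (x :: y :: t) (1 + ((0 : Nat) : Int)) = !segB_adj x y := by
          simpa using break_eq x y t
        have hlen' : t.length = (y :: t).length - 1 := by simp
        rw [hlen', ih]
        by_cases hb : segB_adj x y = true
        · simp [gaps, hb, break_eq]
        · simp [gaps, hb, break_eq]

theorem intCuts_eq (sp : List ((String × Int) × (String × Int))) :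
    (0 : Int) :: ((PySem.List.pyRange 1 (sp.length : Int) 1).filter (segB_break sp) ++ [(sp.length : Int)])
      = (natCuts sp).map Int.ofNat := by
  have h1 : (PySem.List.pyRange 1 (sp.length : Int) 1).filter (segB_break sp)
      = (gaps sp).map (fun (g : Nat) => (1 : Int) + (g : Int)) := by
    rw [PySem.List.pyRange_one, List.filter_map]
    have hlen : (((sp.length : Int)) - 1).toNat = sp.length - 1 := by omega
    rw [hlen]
    have hcong : ∀ k ∈ List.range (sp.length - 1),
        (segB_break sp ∘ fun (k : Nat) => (1 : Int) + (k : Int)) k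
          = (fun (k : Nat) => segB_break sp (1 + (k : Int))) k := fun k _ => rfl
    rw [List.filter_congr hcong, filter_break_eq_gaps]
  rw [h1, natCuts]
  simp only [List.map_cons, List.map_append, List.map_map, Int.ofNat_eq_natCast]
  congr 2
  apply List.map_congr_left
  intro g _
  simp only [Function.comp_apply, Int.ofNat_eq_natCast]
  push_cast; ring

theorem altB_eq_segAlt (sp : List ((String × Int) × (String × Int))) (hne : sp ≠ []) :
    ((((0 : Int) :: ((PySem.List.pyRange 1 (sp.length : Int) 1).filter (segB_break sp) ++ [(sp.length : Int)])).zip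
        (PySem.List.slice ((0 : Int) :: ((PySem.List.pyRange 1 (sp.length : Int) 1).filter (segB_break sp) ++ [(sp.length : Int)])) (some 1) none)).map
      (fun ab => PySem.List.slice sp (some ab.1) (some ab.2))) = segAlt sp := by
  rw [intCuts_eq, PySem.List.slice_from_one]
  have htl : (List.map Int.ofNat (natCuts sp)).tail = List.map Int.ofNat (natCuts sp).tail := by
    cases h : natCuts sp <;> simp
  rw [htl, List.zip_map, List.map_map]
  have hmc : ((natCuts sp).zip (natCuts sp).tail).map
      ((fun ab => PySem.List.slice sp (some ab.1) (some ab.2)) ∘ Prod.map Int.ofNat Int.ofNat)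
      = chunksOf sp (natCuts sp) := by
    apply List.map_congr_left
    intro ab _
    show PySem.List.slice sp (some ((ab.1 : Nat) : Int)) (some ((ab.2 : Nat) : Int)) = _
    rw [PySem.List.slice_natCast]
  rw [hmc, chunksOf_natCuts sp hne]

-- ===== VERDICT (by name: the statement is the Claim_ definition above) =====
theorem segment_duplexes_py_spec : Claim_equal_segment_duplexes_py := by
  intro pairs _
  show segment_duplexes_py pairs = segment_duplexes_py_alt pairs
  unfold segment_duplexes_py segment_duplexes_py_alt
  by_cases hp : pairs = []
  · subst hp; simp [PySem.List.sorted2]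
  · simp only [hp, if_false]
    cases hs : PySem.List.sorted2 pairs (fun p => p.1.1) (fun p => p.1.2) with
    | nil => simp
    | cons x rest =>
        simp only [List.cons_ne_nil, if_false]
        rw [altB_eq_segAlt (x :: rest) (by simp)]
        obtain ⟨r, gs, hsh⟩ := segB_step_shape (segAlt rest) x
        have hxs : segAlt (x :: rest) = (x :: r) :: gs := hsh
        have hg := segG_eq_alt rest [x] x (by simp) r gs hxs
        have hA := segA_loop rest [] [x]
        simp only [List.nil_append] at hA
        show (rest.foldl segA_step ([], [x])).1 ++ [(rest.foldl segA_step ([], [x])).2] = segAlt (x :: rest)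
        rw [hA, hg, hxs]
        simp
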